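-- pv_equiv track=rewrite | github.com/Murali-2569/ai-resume_analyzer | test.py | suggest_roles
-- ===== SOURCE A (Python) =====
-- def suggest_roles(resume_text, role_skill_map):
--     resume_text_lower = resume_text.lower()
--     matched_roles = {}
--
--     for role, skills in role_skill_map.items():
--         match_count = sum(skill.lower() in resume_text_lower for skill in skills)
--         if match_count:
--             matched_roles[role] = match_count
--
--     return sorted(matched_roles.items(), key=lambda x: x[1], reverse=True)
-- ===== SOURCE B (Python) =====
-- def suggest_roles(resume_text, role_skill_map):
--     text = resume_text.lower()
--     n = len(text)
--     # index all substrings of the resume whose length some skill has; each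
--     # skill test then becomes one hash-set lookup instead of a text scan
--     lengths = {len(skill.lower()) for skills in role_skill_map.values() for skill in skills}
--     windows = {text[i:i + L] for L in lengths for i in range(n - L + 1)}
--     results = []
--     for role, skills in role_skill_map.items():
--         count = sum(skill.lower() in windows for skill in skills)
--         if count:
--             results.append((role, count))
--     return sorted(results, key=lambda x: x[1], reverse=True)
-- ===== Notes on version B (the rewrite author's own statement) =====
-- stated objective: faster
-- what changed: B builds a hash-set index of all substrings of the lowered resume whose lengths occur among the skills, so every skill test is one set lookup instead of a substring scan of the resume, and it accumulates (role,count) in a plain list instead of a dict.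
import Mathlib
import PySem

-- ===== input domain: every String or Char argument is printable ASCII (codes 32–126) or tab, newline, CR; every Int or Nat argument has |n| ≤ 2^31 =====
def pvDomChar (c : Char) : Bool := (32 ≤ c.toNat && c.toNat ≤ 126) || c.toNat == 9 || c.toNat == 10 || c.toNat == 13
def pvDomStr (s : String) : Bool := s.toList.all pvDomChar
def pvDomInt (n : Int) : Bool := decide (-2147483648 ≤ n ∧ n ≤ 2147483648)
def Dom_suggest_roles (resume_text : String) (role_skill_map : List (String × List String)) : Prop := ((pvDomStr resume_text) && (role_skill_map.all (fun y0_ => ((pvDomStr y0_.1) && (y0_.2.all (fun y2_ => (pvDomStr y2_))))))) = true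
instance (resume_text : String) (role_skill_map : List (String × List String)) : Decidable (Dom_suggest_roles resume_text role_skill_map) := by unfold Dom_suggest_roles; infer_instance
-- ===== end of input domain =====

-- B replaces A's per-skill substring scans of the resume by a precomputed set of all
-- resume substrings of the occurring skill lengths (one lookup per skill) and builds
-- the (role, count) list directly instead of through a dict (objective: alternative).


-- ===== PORT A =====
-- sum(skill.lower() in resume_text_lower for skill in skills)
def pvCountA (lowerText : String) (skills : List String) : Int :=
  (skills.map (fun sk => if PySem.Str.isIn (PySem.Str.lower sk) lowerText then (1 : Int) else 0)).sum

def suggest_roles (resume_text : String) (role_skill_map : List (String × List String)) : List (String × Int) :=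
  let resume_text_lower := PySem.Str.lower resume_text
  let matched_roles := (PySem.Dict.ofList role_skill_map).items.foldl
    (fun (d : PySem.Dict String Int) p =>
      let match_count := pvCountA resume_text_lower p.2
      if match_count ≠ 0 then d.insert p.1 match_count else d)
    PySem.Dict.empty
  PySem.List.sorted matched_roles.items (fun x => x.2) true

-- ===== PORT B =====
-- {len(skill.lower()) for skills in role_skill_map.values() for skill in skills}
def pvLengthsB (items : List (String × List String)) : PySem.Set Int :=
  PySem.Set.ofList (items.flatMap (fun p => p.2.map (fun sk => PySem.Str.len (PySem.Str.lower sk))))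

-- {text[i:i+L] for L in lengths for i in range(n - L + 1)}
def pvWindowsB (text : String) (lengths : PySem.Set Int) : PySem.Set String :=
  PySem.Set.ofList (List.flatMap (fun L =>
      (PySem.List.pyRange 0 (PySem.Str.len text - L + 1) 1).map
        (fun i => PySem.Str.slice text (some i) (some (i + L)))) lengths)

-- sum(skill.lower() in windows for skill in skills)
def pvCountB (windows : PySem.Set String) (skills : List String) : Int :=
  (skills.map (fun sk => if PySem.Set.contains windows (PySem.Str.lower sk) then (1 : Int) else 0)).sum

def suggest_roles_alt (resume_text : String) (role_skill_map : List (String × List String)) : List (String × Int) :=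
  let text := PySem.Str.lower resume_text
  let items := (PySem.Dict.ofList role_skill_map).items
  let windows := pvWindowsB text (pvLengthsB items)
  let results := items.foldl
    (fun (acc : List (String × Int)) p =>
      let count := pvCountB windows p.2
      if count ≠ 0 then acc ++ [(p.1, count)] else acc)
    []
  PySem.List.sorted results (fun x => x.2) true

-- ===== PRECONDITION & SPEC =====
def Spec_suggest_roles (resume_text : String) (role_skill_map : List (String × List String)) (out : List (String × Int)) : Prop := out = suggest_roles_alt resume_text role_skill_map
instance (resume_text : String) (role_skill_map : List (String × List String)) (out : List (String × Int)) : Decidable (Spec_suggest_roles resume_text role_skill_map out) := by unfold Spec_suggest_roles; infer_instance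

-- ===== CLAIM (what is proved, stated in full; the proofs are below) =====
def Claim_equal_suggest_roles : Prop := ∀ (resume_text : String) (role_skill_map : List (String × List String)), Dom_suggest_roles resume_text role_skill_map → Spec_suggest_roles resume_text role_skill_map (suggest_roles resume_text role_skill_map)

-- ===== LEMMAS AND PROOFS =====

-- membership in the window set is exactly the substring test, for any string whose
-- length occurs among the (nonnegative) indexed lengths
theorem pvContains_windows_iff (text k : String) (lengths : List Int)
    (hk : PySem.Str.len k ∈ lengths) (hnn : ∀ L ∈ lengths, 0 ≤ L) :
    PySem.Set.contains (pvWindowsB text lengths) k = true ↔ PySem.Str.isIn k text = true := by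
  unfold pvWindowsB
  have hmem : ∀ (s : PySem.Set String), PySem.Set.contains s k = true ↔ k ∈ s := by
    intro s; simp [PySem.Set.contains]
  rw [hmem, PySem.Set.mem_ofList, List.mem_flatMap, PySem.Str.isIn_iff_infix]
  constructor
  · rintro ⟨L, hL, hkmem⟩
    rcases List.mem_map.mp hkmem with ⟨i, hi, rfl⟩
    rcases PySem.List.mem_pyRange_one.mp hi with ⟨h0i, _⟩
    have hLnn := hnn L hL
    rw [PySem.Str.toList_slice, PySem.Chars.slice_eq_listSlice,
        PySem.List.slice_toNat _ h0i (by omega)]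
    exact (List.take_prefix _ _).isInfix.trans (List.drop_suffix _ _).isInfix
  · intro hinf
    obtain ⟨s, u, hsu⟩ := hinf
    refine ⟨PySem.Str.len k, hk, List.mem_map.mpr ⟨(s.length : Int), ?_, ?_⟩⟩
    · rw [PySem.List.mem_pyRange_one]
      refine ⟨by positivity, ?_⟩
      have hlen : s.length + k.toList.length + u.length = text.toList.length := by
        have := congrArg List.length hsu
        simp only [List.length_append] at this
        omega
      rw [PySem.Str.len_eq, PySem.Str.len_eq]
      omega
    · apply String.toList_inj.mp
      rw [PySem.Str.toList_slice, PySem.Chars.slice_eq_listSlice, PySem.Str.len_eq,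
          PySem.List.slice_natCast_add, ← hsu]
      simp

theorem pvLengthsB_nonneg (items : List (String × List String)) :
    ∀ L ∈ (pvLengthsB items : List Int), 0 ≤ L := by
  intro L hL
  unfold pvLengthsB at hL
  rw [PySem.Set.mem_ofList, List.mem_flatMap] at hL
  obtain ⟨p, _, hmem⟩ := hL
  rcases List.mem_map.mp hmem with ⟨sk, _, rfl⟩
  rw [PySem.Str.len_eq]
  positivity

theorem pvLengthsB_mem (items : List (String × List String)) (p : String × List String)
    (hp : p ∈ items) (sk : String) (hsk : sk ∈ p.2) :
    PySem.Str.len (PySem.Str.lower sk) ∈ (pvLengthsB items : List Int) := by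
  unfold pvLengthsB
  rw [PySem.Set.mem_ofList, List.mem_flatMap]
  exact ⟨p, hp, List.mem_map.mpr ⟨sk, hsk, rfl⟩⟩

theorem pvCountB_eq_countA (text : String) (items : List (String × List String))
    (p : String × List String) (hp : p ∈ items) :
    pvCountB (pvWindowsB text (pvLengthsB items)) p.2 = pvCountA text p.2 := by
  unfold pvCountA pvCountB
  congr 1
  apply List.map_congr_left
  intro sk hsk
  exact if_congr
    (pvContains_windows_iff text (PySem.Str.lower sk) (pvLengthsB items)
      (pvLengthsB_mem items p hp sk hsk) (pvLengthsB_nonneg items))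
    rfl rfl

-- the A-side dict fold over fresh distinct keys produces exactly the B-side list fold
theorem pvBuild_eq (text : String) (items : List (String × List String))
    (d : PySem.Dict String Int)
    (hfresh : ∀ p ∈ items, d.contains p.1 = false)
    (hnd : (items.map (·.1)).Nodup) :
    (items.foldl
      (fun (d : PySem.Dict String Int) p =>
        if pvCountA text p.2 ≠ 0 then d.insert p.1 (pvCountA text p.2) else d) d).items =
    items.foldl
      (fun (acc : List (String × Int)) p =>
        if pvCountA text p.2 ≠ 0 then acc ++ [(p.1, pvCountA text p.2)] else acc) d.items := by
  induction items generalizing d with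
  | nil => rfl
  | cons p t ih =>
    simp only [List.foldl_cons]
    simp only [List.map_cons, List.nodup_cons, List.mem_map] at hnd
    by_cases hc : pvCountA text p.2 ≠ 0
    · rw [if_pos hc, if_pos hc]
      rw [ih]
      · rw [PySem.Dict.items_insert, hfresh p (List.mem_cons_self)]
        rfl
      · intro q hq
        rw [PySem.Dict.contains_insert]
        have hne : (q.1 == p.1) = false := by
          simp only [beq_eq_false_iff_ne]
          intro heq
          exact hnd.1 ⟨q, hq, heq⟩
        rw [hne, hfresh q (List.mem_cons_of_mem _ hq), Bool.or_false]
      · exact hnd.2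
    · rw [if_neg hc, if_neg hc]
      exact ih d (fun q hq => hfresh q (List.mem_cons_of_mem _ hq)) hnd.2

-- ===== VERDICT (by name: the statement is the Claim_ definition above) =====
theorem suggest_roles_spec : Claim_equal_suggest_roles := by
  intro resume_text role_skill_map _
  unfold Spec_suggest_roles suggest_roles suggest_roles_alt
  dsimp only
  have hnd : (((PySem.Dict.ofList role_skill_map).items.map (·.1)) : List String).Nodup :=
    PySem.Dict.nodup_keys_ofList role_skill_map
  have hfresh : ∀ p ∈ (PySem.Dict.ofList role_skill_map).items,
      (PySem.Dict.empty : PySem.Dict String Int).contains p.1 = false := by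
    intro p _; exact PySem.Dict.contains_empty _
  rw [pvBuild_eq (PySem.Str.lower resume_text) _ _ hfresh hnd]
  congr 1
  apply PySem.List.foldl_congr_mem
  intro acc p hp
  rw [pvCountB_eq_countA (PySem.Str.lower resume_text) _ p hp]
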